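-- pv_equiv track=rewrite | github.com/Hetharsi/poker | poker_rules.py | best_drill
-- ===== SOURCE A (Python) =====
-- def isDrill(hand):
--     isDrill = False
--     hand = list(map (lambda x: x[1], hand))
--     myTuple = ()
--     setHand = sorted(list(set(hand)))
--     for i in setHand:
--         myTuple += ((i, hand.count(i)),)
--     for x in myTuple:
--         if x[1] == 3: isDrill = True
--     return(isDrill)
--
-- def best_drill(hand):
--     bestDrill = ()
--     if isDrill(hand) == True:
--         hand = list(map (lambda x: x[1], hand))
--         setHand = sorted(list(set(hand)))
--         myTuple = ()
--         for i in setHand: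
--             myTuple += ((i, hand.count(i)),)
--         bestTuples = tuple(filter((lambda x: x[1] == 3), myTuple))
--         bestDrill = bestTuples[0]
--         for x in bestTuples:
--             if(x[0]>bestDrill[0]):
--                 bestDrill = x
--         return(bestDrill)
-- ===== SOURCE B (Python) =====
-- def best_drill(hand):
--     ranks = sorted((card[1] for card in hand), reverse=True)
--     i, n = 0, len(ranks)
--     while i < n:
--         j = i
--         while j < n and ranks[j] == ranks[i]:
--             j += 1
--         if j - i == 3:
--             return (ranks[i], 3)
--         i = j
--     return None
-- ===== Notes on version B (the rewrite author's own statement) =====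
-- stated objective: faster
-- what changed: Replaces A's set/sort/count-per-distinct-rank pipeline (run twice, in isDrill and again in best_drill) by one descending sort of the ranks followed by a single run-length scan that returns at the first run of length exactly 3.
import Mathlib
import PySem

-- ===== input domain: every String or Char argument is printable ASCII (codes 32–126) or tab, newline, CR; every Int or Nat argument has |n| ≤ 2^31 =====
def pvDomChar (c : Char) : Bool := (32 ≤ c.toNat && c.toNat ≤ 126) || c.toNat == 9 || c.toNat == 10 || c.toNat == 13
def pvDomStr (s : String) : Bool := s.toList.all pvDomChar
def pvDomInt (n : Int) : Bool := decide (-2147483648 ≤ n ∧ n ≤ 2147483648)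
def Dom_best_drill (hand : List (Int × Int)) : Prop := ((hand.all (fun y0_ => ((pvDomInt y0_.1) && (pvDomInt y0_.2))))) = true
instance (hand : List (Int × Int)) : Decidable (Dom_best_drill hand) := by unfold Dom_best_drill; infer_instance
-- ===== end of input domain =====

-- B replaces A's double set/sort/count pipeline by one descending sort of the ranks and a single run-length scan returning at the first run of length exactly 3 (objective: faster).


-- ===== PORT A =====
-- helper isDrill, transliterated
def isDrill (hand : List (Int × Int)) : Bool :=
  let isDrill0 : Bool := false
  let hand1 : List Int := hand.map (fun x => x.2)
  let setHand : List Int := PySem.List.sorted (PySem.Set.ofList hand1) (fun x => x) false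
  let myTuple : List (Int × Int) :=
    setHand.foldl (fun acc i => acc ++ [(i, (PySem.List.count hand1 i : Int))]) []
  myTuple.foldl (fun b x => if x.2 == 3 then true else b) isDrill0

def best_drill (hand : List (Int × Int)) : Option (Int × Int) :=
  if isDrill hand == true then
    let hand1 : List Int := hand.map (fun x => x.2)
    let setHand : List Int := PySem.List.sorted (PySem.Set.ofList hand1) (fun x => x) false
    let myTuple : List (Int × Int) :=
      setHand.foldl (fun acc i => acc ++ [(i, (PySem.List.count hand1 i : Int))]) []
    let bestTuples : List (Int × Int) := myTuple.filter (fun x => x.2 == 3)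
    match bestTuples with
    | [] => none  -- unreachable: Python's bestTuples[0] would be IndexError; isDrill guarantees nonempty
    | h :: _ =>
      some (bestTuples.foldl (fun bestDrill x => if x.1 > bestDrill.1 then x else bestDrill) h)
  else none

-- ===== PORT B =====
-- the run-length scan of B's while loop over the sorted-descending ranks: the run at the head is
-- the head plus the takeWhile of the tail (j - i == 3 ↔ tail run length == 2), and the scan resumes at dropWhile
def runScan (l : List Int) : Option (Int × Int) :=
  match l with
  | [] => none
  | x :: xs =>
    if (xs.takeWhile (fun y => y == x)).length == 2 then some (x, 3)
    else runScan (xs.dropWhile (fun y => y == x))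
termination_by l.length
decreasing_by
  simp only [List.length_cons]
  exact Nat.lt_succ_of_le (List.dropWhile_sublist _).length_le

def best_drill_alt (hand : List (Int × Int)) : Option (Int × Int) :=
  runScan (PySem.List.sorted (hand.map (fun card => card.2)) (fun x => x) true)

-- ===== PRECONDITION & SPEC =====
def Spec_best_drill (hand : List (Int × Int)) (out : Option (Int × Int)) : Prop := out = best_drill_alt hand
instance (hand : List (Int × Int)) (out : Option (Int × Int)) : Decidable (Spec_best_drill hand out) := by unfold Spec_best_drill; infer_instance

-- ===== CLAIM (what is proved, stated in full; the proofs are below) =====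
def Claim_equal_best_drill : Prop := ∀ (hand : List (Int × Int)), Dom_best_drill hand → Spec_best_drill hand (best_drill hand)

-- ===== LEMMAS AND PROOFS =====

-- canonical form both ports are reduced to: the largest rank of count exactly 3, if any
-- (the last element of the ascending sorted distinct ranks filtered to count == 3)
def canon (ranks : List Int) : Option (Int × Int) :=
  (((PySem.List.sorted (PySem.Set.ofList ranks) (fun x => x) false).filter
      (fun v => ranks.count v == 3)).getLast?).map (fun v => (v, (3 : Int)))

-- the Int-cast count test of A's tuples equals the Nat count test of canon
lemma intBeqThree (c : Nat) : (((c : Int)) == 3) = (c == 3) := by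
  by_cases h : c = 3
  · subst h; simp
  · have h' : ((c : Int)) ≠ 3 := by exact_mod_cast h
    simp [h, h']

lemma getLast?_cons_eq (h : Int) (rest : List Int) :
    (h :: rest).getLast? = some (rest.getLastD h) := by
  induction rest generalizing h with
  | nil => rfl
  | cons y t ih => rw [List.getLastD_cons]; exact ih y

lemma le_getLastD_of_pairwise_le (l : List Int) (d : Int)
    (hp : l.Pairwise (· ≤ ·)) (v : Int) (hv : v ∈ l) : v ≤ l.getLastD d := by
  induction l generalizing d with
  | nil => cases hv
  | cons x t ih =>
    rw [List.getLastD_cons]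
    have hxle : ∀ y ∈ t, x ≤ y := (List.pairwise_cons.mp hp).1
    have hpt : t.Pairwise (· ≤ ·) := (List.pairwise_cons.mp hp).2
    rcases List.mem_cons.mp hv with h | hv2
    · rw [h]
      rcases List.mem_cons.mp (List.getLastD_mem_cons (l := t) (a := x)) with h2 | h2
      · rw [h2]
      · exact hxle _ h2
    · exact ih x hpt hv2

-- first satisfying element of a descending list is the maximum satisfying element
lemma find?_sorted_desc (l : List Int) (q : Int → Bool)
    (hp : l.Pairwise (fun a b => b ≤ a)) (m : Int) (hm : m ∈ l) (hq : q m = true)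
    (hmax : ∀ v ∈ l, q v = true → v ≤ m) : l.find? q = some m := by
  induction l with
  | nil => cases hm
  | cons x t ih =>
    have hle : ∀ y ∈ t, y ≤ x := (List.pairwise_cons.mp hp).1
    have hpt := (List.pairwise_cons.mp hp).2
    by_cases hx : q x = true
    · rw [List.find?_cons_of_pos hx]
      have h1 : x ≤ m := hmax x (List.mem_cons_self ..) hx
      have h2 : m ≤ x := by
        rcases List.mem_cons.mp hm with h | hm2
        · exact le_of_eq h
        · exact hle _ hm2
      rw [le_antisymm h1 h2]
    · have hx' : q x = false := by simpa using hx
      rw [List.find?_cons_of_neg (by simp [hx'])]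
      have hm' : m ∈ t := by
        rcases List.mem_cons.mp hm with h | hm2
        · exact absurd hq (by rw [h]; simp [hx'])
        · exact hm2
      exact ih hpt hm' (fun v hv hqv => hmax v (List.mem_cons_of_mem _ hv) hqv)

lemma find?_congr_mem (l : List Int) (p q : Int → Bool)
    (h : ∀ x ∈ l, p x = q x) : l.find? p = l.find? q := by
  induction l with
  | nil => rfl
  | cons x t ih =>
    by_cases hx : p x = true
    · rw [List.find?_cons_of_pos hx, List.find?_cons_of_pos (by rw [← h x (List.mem_cons_self ..)]; exact hx)]
    · have hx' : p x = false := by simpa using hx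
      rw [List.find?_cons_of_neg (by simp [hx']),
          List.find?_cons_of_neg (by simp [← h x (List.mem_cons_self ..), hx'])]
      exact ih (fun y hy => h y (List.mem_cons_of_mem _ hy))

lemma find?_append_of_forall_neg (t d : List Int) (q : Int → Bool)
    (h : ∀ y ∈ t, q y = false) : (t ++ d).find? q = d.find? q := by
  induction t with
  | nil => rfl
  | cons y t ih =>
    rw [List.cons_append, List.find?_cons_of_neg (by simp [h y (List.mem_cons_self ..)])]
    exact ih (fun z hz => h z (List.mem_cons_of_mem _ hz))

-- elements surviving dropWhile (== x) of a descending list bounded by x are strictly below x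
lemma dropWhile_lt (xs : List Int) (x : Int) (hp : xs.Pairwise (fun a b => b ≤ a))
    (hb : ∀ y ∈ xs, y ≤ x) : ∀ v ∈ xs.dropWhile (fun y => y == x), v < x := by
  induction xs with
  | nil => intro v hv; cases hv
  | cons y ys ih =>
    intro v hv
    by_cases hy : (y == x) = true
    · rw [List.dropWhile_cons] at hv
      rw [if_pos hy] at hv
      exact ih (List.pairwise_cons.mp hp).2 (fun z hz => hb z (List.mem_cons_of_mem _ hz)) v hv
    · rw [List.dropWhile_cons] at hv
      rw [if_neg hy] at hv
      have hyx : y < x := lt_of_le_of_ne (hb y (List.mem_cons_self ..)) (by simpa using hy)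
      rcases List.mem_cons.mp hv with h | hv2
      · rw [h]; exact hyx
      · exact lt_of_le_of_lt ((List.pairwise_cons.mp hp).1 v hv2) hyx

-- runScan on a descending list finds the first (= largest) value of count exactly 3
lemma runScan_eq_find? (n : Nat) : ∀ (l : List Int), l.length ≤ n →
    l.Pairwise (fun a b => b ≤ a) →
    runScan l = (l.find? (fun v => l.count v == 3)).map (fun v => (v, (3 : Int))) := by
  induction n with
  | zero =>
    intro l hl _
    have : l = [] := List.eq_nil_of_length_eq_zero (Nat.le_zero.mp hl)
    subst this
    simp [runScan]
  | succ n ih =>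
    intro l hl hp
    match l with
    | [] => simp [runScan]
    | x :: xs =>
      have hble : ∀ y ∈ xs, y ≤ x := (List.pairwise_cons.mp hp).1
      have hpxs : xs.Pairwise (fun a b => b ≤ a) := (List.pairwise_cons.mp hp).2
      set t := xs.takeWhile (fun y => y == x) with ht
      set d := xs.dropWhile (fun y => y == x) with hd
      have hxs : t ++ d = xs := List.takeWhile_append_dropWhile
      have htx : ∀ y ∈ t, y = x := by
        intro y hy
        have := List.mem_takeWhile_imp hy
        exact eq_of_beq this
      have hdlt : ∀ v ∈ d, v < x := dropWhile_lt xs x hpxs hble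
      have hxd : x ∉ d := fun hmem => absurd (hdlt x hmem) (lt_irrefl x)
      have hcx : (x :: xs).count x = t.length + 1 := by
        rw [← hxs, List.count_cons_self, List.count_append,
            List.count_eq_zero.mpr hxd, List.count_eq_length.mpr (fun b hb => (htx b hb).symm)]
      have hcountd : ∀ v ∈ d, (x :: xs).count v = d.count v := by
        intro v hv
        have hvx : v ≠ x := ne_of_lt (hdlt v hv)
        have hvt : v ∉ t := fun hmem => hvx (htx v hmem)
        rw [← hxs, List.count_cons_of_ne (Ne.symm hvx), List.count_append, List.count_eq_zero.mpr hvt]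
        omega
      rw [runScan]
      by_cases hrun : (t.length == 2) = true
      · rw [← ht, if_pos hrun]
        have : ((x :: xs).count x == 3) = true := by
          have h3 := hcx
          rw [List.count_cons_self] at h3
          simp at hrun ⊢
          omega
        have hfind : List.find? (fun v => List.count v (x :: xs) == 3) (x :: xs) = some x :=
          List.find?_cons_of_pos this
        rw [hfind]
        rfl
      · rw [← ht, if_neg hrun]
        have hqx : ((x :: xs).count x == 3) = false := by
          have h3 := hcx
          rw [List.count_cons_self] at h3
          simp at hrun ⊢
          omega
        have hfx : List.find? (fun v => List.count v (x :: xs) == 3) (x :: xs)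
            = List.find? (fun v => List.count v (x :: xs) == 3) xs :=
          List.find?_cons_of_neg (by intro h; exact Bool.false_ne_true (hqx.symm.trans h))
        have hfxs : List.find? (fun v => List.count v (x :: xs) == 3) xs
            = List.find? (fun v => List.count v (x :: xs) == 3) d :=
          (congrArg (List.find? (fun v => List.count v (x :: xs) == 3)) hxs.symm).trans
            (find?_append_of_forall_neg t d _ (fun y hy => by rw [htx y hy]; exact hqx))
        have hdp : d.Pairwise (fun a b => b ≤ a) :=
          List.Pairwise.sublist (List.dropWhile_sublist _) hpxs
        have hdlen : d.length ≤ n := by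
          have h1 : d.length ≤ xs.length := (List.dropWhile_sublist _).length_le
          have h2 : xs.length + 1 ≤ n + 1 := by simpa using hl
          omega
        rw [← hd, hfx, hfxs, ih d hdlen hdp]
        exact congrArg _ (find?_congr_mem d _ _ (fun v hv => by rw [hcountd v hv]))

-- ----- B reduces to canon -----
lemma B_canon (hand : List (Int × Int)) :
    best_drill_alt hand = canon (hand.map (fun x => x.2)) := by
  unfold best_drill_alt canon
  set ranks : List Int := hand.map (fun x => x.2) with hranks
  set L : List Int := PySem.List.sorted ranks (fun x => x) true with hL
  set S : List Int := PySem.List.sorted (PySem.Set.ofList ranks) (fun x => x) false with hS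
  set q : Int → Bool := fun v => ranks.count v == 3 with hq
  have hLperm : L.Perm ranks := PySem.List.sorted_perm ranks (fun x => x) true
  have hLp : L.Pairwise (fun a b => b ≤ a) := PySem.List.sorted_pairwise_rev ranks (fun x => x)
  have hmemL : ∀ v, v ∈ L ↔ v ∈ ranks := fun v => hLperm.mem_iff
  have hrs : runScan L = (L.find? q).map (fun v => (v, (3 : Int))) := by
    rw [runScan_eq_find? L.length L (le_refl _) hLp]
    exact congrArg _ (find?_congr_mem L _ _ (fun v _ => by rw [hLperm.count_eq]))
  rw [hrs]
  have hmemS : ∀ v, v ∈ S ↔ v ∈ ranks := by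
    intro v
    rw [hS, PySem.List.mem_sorted, PySem.Set.mem_ofList]
  match hT : S.filter q with
  | [] =>
    have hnone : L.find? q = none := by
      rw [List.find?_eq_none]
      intro v hv
      have hvS : v ∈ S := (hmemS v).mpr ((hmemL v).mp hv)
      have := List.filter_eq_nil_iff.mp hT v hvS
      simpa using this
    rw [hnone]
    rfl
  | h :: rest =>
    set m : Int := rest.getLastD h with hm
    have hmT : m ∈ S.filter q := by rw [hT]; exact List.getLastD_mem_cons (l := rest) (a := h)
    have hmS : m ∈ S := List.mem_of_mem_filter hmT
    have hqm : q m = true := List.of_mem_filter hmT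
    have hTp : (S.filter q).Pairwise (· < ·) :=
      (PySem.List.sorted_ofList_pairwise_lt ranks).filter q
    have hmax : ∀ v ∈ L, q v = true → v ≤ m := by
      intro v hv hqv
      have hvT : v ∈ S.filter q := List.mem_filter.mpr ⟨(hmemS v).mpr ((hmemL v).mp hv), hqv⟩
      rw [hT] at hvT hTp
      have : v ≤ (h :: rest).getLastD 0 :=
        le_getLastD_of_pairwise_le (h :: rest) 0 (hTp.imp le_of_lt) v hvT
      rwa [List.getLastD_cons] at this
    rw [find?_sorted_desc L q hLp m ((hmemL m).mpr ((hmemS m).mp hmS)) hqm hmax,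
        getLast?_cons_eq]

-- ----- A reduces to canon -----
-- A's best-tuple scan over a list with strictly increasing first components picks the last element
lemma foldl_pick_of_pairwise_lt (t : List (Int × Int)) (b : Int × Int)
    (hlt : ∀ x ∈ t, b.1 < x.1) (hp : t.Pairwise (fun x y => x.1 < y.1)) :
    t.foldl (fun bestDrill x => if x.1 > bestDrill.1 then x else bestDrill) b = t.getLastD b := by
  induction t generalizing b with
  | nil => rfl
  | cons x t ih =>
    have hbx : b.1 < x.1 := hlt x (by simp)
    simp only [List.foldl_cons, List.getLastD_cons, if_pos hbx]
    exact ih x (fun y hy => (List.pairwise_cons.mp hp).1 y hy) (List.pairwise_cons.mp hp).2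

-- getLastD through a map
lemma getLastD_map_int (f : Int → Int × Int) (l : List Int) (a : Int) :
    (l.map f).getLastD (f a) = f (l.getLastD a) := by
  induction l generalizing a with
  | nil => rfl
  | cons x t ih => rw [List.map_cons, List.getLastD_cons, List.getLastD_cons]; exact ih x

lemma A_canon (hand : List (Int × Int)) :
    best_drill hand = canon (hand.map (fun x => x.2)) := by
  unfold best_drill canon isDrill
  simp only []
  set ranks : List Int := hand.map (fun x => x.2) with hranks
  set S : List Int := PySem.List.sorted (PySem.Set.ofList ranks) (fun x => x) false with hS
  set g : Int → Int × Int := fun i => (i, (PySem.List.count ranks i : Int)) with hg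
  set q : Int → Bool := fun v => ranks.count v == 3 with hq
  -- A's myTuple is S.map g
  have hmy : S.foldl (fun acc i => acc ++ [(i, (PySem.List.count ranks i : Int))]) [] = S.map g := by
    rw [PySem.List.foldl_append_singleton_eq_map]; rfl
  -- A's isDrill flag
  have hdrill : (S.map g).foldl (fun b x => if x.2 == 3 then true else b) false
      = S.any fun i => q i := by
    rw [PySem.List.foldl_if_true_eq, List.any_map]
    simp only [Bool.false_or]
    refine PySem.List.any_congr_mem ?_
    intro v _
    show ((g v).2 == 3) = q v
    rw [hg, hq]
    simp only [PySem.List.count_eq]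
    exact intBeqThree _
  -- bestTuples is (S.filter q).map g
  have hft : (S.map g).filter (fun x => x.2 == 3) = (S.filter q).map g := by
    rw [List.filter_map]
    congr 1
    refine List.filter_congr ?_
    intro v _
    show ((g v).2 == 3) = q v
    rw [hg, hq]
    simp only [PySem.List.count_eq]
    exact intBeqThree _
  rw [hmy, hdrill, hft]
  have hSp : S.Pairwise (· < ·) := PySem.List.sorted_ofList_pairwise_lt ranks
  match hT : S.filter q with
  | [] =>
    have hany : (S.any fun i => q i) = false := by
      rw [List.any_eq_false]
      intro v hv
      have := List.filter_eq_nil_iff.mp hT v hv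
      simpa using this
    rw [hany]
    simp
  | h :: rest =>
    have hhT : h ∈ S.filter q := by rw [hT]; exact List.mem_cons_self ..
    have hany : (S.any fun i => q i) = true :=
      List.any_eq_true.mpr ⟨h, List.mem_of_mem_filter hhT, List.of_mem_filter hhT⟩
    rw [hany]
    simp only [beq_self_eq_true, if_pos, List.map_cons]
    have hTp : (h :: rest).Pairwise (· < ·) := by rw [← hT]; exact hSp.filter q
    have hlt : ∀ y ∈ rest, h < y := fun y hy => (List.pairwise_cons.mp hTp).1 y hy
    have hTp' : rest.Pairwise (· < ·) := (List.pairwise_cons.mp hTp).2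
    have hA : (g h :: rest.map g).foldl
        (fun bestDrill x => if x.1 > bestDrill.1 then x else bestDrill) (g h)
        = g (rest.getLastD h) := by
      rw [List.foldl_cons, if_neg (by simp), ← getLastD_map_int g rest h]
      refine foldl_pick_of_pairwise_lt _ _ ?_ ?_
      · intro x hx
        obtain ⟨y, hy, rfl⟩ := List.mem_map.mp hx
        simpa [hg] using hlt y hy
      · exact (List.pairwise_map.mpr (by simpa [hg] using hTp'))
    rw [hA, getLast?_cons_eq]
    -- the last element is in the filtered list, so its count is 3
    have hmem : rest.getLastD h ∈ S.filter q := by rw [hT]; exact List.getLastD_mem_cons (l := rest) (a := h)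
    have hqm : q (rest.getLastD h) = true := List.of_mem_filter hmem
    have hc3 : (PySem.List.count ranks (rest.getLastD h) : Int) = 3 := by
      rw [hq] at hqm
      simp only [beq_iff_eq] at hqm
      rw [PySem.List.count_eq]
      exact_mod_cast hqm
    simp only [hg, Option.map_some]
    exact congrArg some (congrArg (Prod.mk (rest.getLastD h)) hc3)

-- ===== VERDICT (by name: the statement is the Claim_ definition above) =====
theorem best_drill_spec : Claim_equal_best_drill := by
  intro hand _
  unfold Spec_best_drill
  rw [A_canon, B_canon]
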